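-- pv_equiv track=rewrite | github.com/eman-debz/Algorithmic-Programming- | binaryGap-Codility.py | solution
-- ===== SOURCE A (Python) =====
-- def solution(binary):
--     gaps = []
--     count = 0
--     if '0' not in binary:
--         return 0
--     if binary.count('1') < 2:
--         return 0
--     for i in range(len(binary)-1):
--         if binary[i] == '1' and binary[i+1] == '0' :
--             pass
--         if binary[i] == '0':
--             count +=1
--         if binary[i+1] == '1' and binary[i] == '0' :
--             gaps.append(count)
--             count = 0
--     if len(gaps) < 1:
--         return 0
--     return max(gaps)
-- ===== SOURCE B (Python) =====
-- def solution(binary):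
--     if binary.count('1') < 2:
--         return 0
--     parts = binary.split("01")
--     if len(parts) == 1:
--         return 0
--     return max(p.count('0') + 1 for p in parts[:-1])
-- ===== Notes on version B (the rewrite author's own statement) =====
-- stated objective: simpler
-- what changed: Replaces the stateful char-by-char counter/flush loop with split-and-measure: every occurrence of a zero immediately followed by a one is exactly a flush point of A, so B splits the string on that two-character separator and returns the maximum of (zeros in piece) + 1 over all pieces before the last.
import Mathlib
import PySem

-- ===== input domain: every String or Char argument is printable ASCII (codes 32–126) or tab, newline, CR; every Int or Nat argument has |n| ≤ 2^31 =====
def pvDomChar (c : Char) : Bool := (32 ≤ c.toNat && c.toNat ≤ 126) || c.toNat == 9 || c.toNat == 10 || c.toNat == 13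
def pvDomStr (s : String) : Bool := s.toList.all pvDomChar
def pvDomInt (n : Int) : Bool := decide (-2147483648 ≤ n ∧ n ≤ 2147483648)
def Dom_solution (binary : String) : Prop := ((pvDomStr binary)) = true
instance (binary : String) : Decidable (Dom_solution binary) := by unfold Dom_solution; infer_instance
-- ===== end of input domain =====

-- B replaces A's stateful counter/flush character loop with split-and-measure on the "01"
-- separator (each "01" occurrence is exactly a flush point of A) — objective: simpler.

-- ===== PORT A =====
-- (the Python's first `if binary[i]=='1' and binary[i+1]=='0': pass` has no effect and is omitted;
--  the `.getD ' '` defaults on pyGet? are never read: i and i+1 are in range for i in range(len-1))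
def solution (binary : String) : Int :=
  if PySem.Str.isIn "0" binary = false then 0
  else if PySem.Str.count binary "1" < 2 then 0
  else
    let st := (PySem.List.pyRange 0 (PySem.Str.len binary - 1) 1).foldl
      (fun (s : List Int × Int) i =>
        let c  := (PySem.Str.pyGet? binary i).getD ' '
        let c' := (PySem.Str.pyGet? binary (i + 1)).getD ' '
        let count := if c == '0' then s.2 + 1 else s.2
        if c' == '1' && c == '0' then (s.1 ++ [count], (0 : Int)) else (s.1, count))
      ([], 0)
    if st.1.length < 1 then 0
    else
      -- max(gaps): gaps is nonempty here, so Python's max never raises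
      match PySem.List.max? st.1 (fun y => y) with
      | some m => m
      | none => 0

-- ===== PORT B =====
-- (split? never returns none: the separator "01" is nonempty; max? never returns none under the
--  guard: parts[:-1] is nonempty when len(parts) != 1)
def solution_alt (binary : String) : Int :=
  if PySem.Str.count binary "1" < 2 then 0
  else
    let parts := (PySem.Str.split? binary "01").getD []
    if parts.length = 1 then 0
    else
      match PySem.List.max? ((PySem.List.slice parts none (some (-1))).map
          (fun p => (PySem.Str.count p "0" : Int) + 1)) (fun y => y) with
      | some m => m
      | none => 0

-- ===== PRECONDITION & SPEC =====
-- (no Pre_: the Python A returns normally on every string)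
def Spec_solution (binary : String) (out : Int) : Prop := out = solution_alt binary
instance (binary : String) (out : Int) : Decidable (Spec_solution binary out) := by unfold Spec_solution; infer_instance

-- ===== CLAIM (what is proved, stated in full; the proofs are below) =====
def Claim_equal_solution : Prop := ∀ (binary : String), Dom_solution binary → Spec_solution binary (solution binary)

-- ===== LEMMAS AND PROOFS =====

-- Structural specification of Python's split on the two-character separator "01".
def split01Rec : List Char → List (List Char)
  | c1 :: c2 :: rest =>
      if c1 == '0' && c2 == '1' then [] :: split01Rec rest
      else
        match split01Rec (c2 :: rest) with
        | p :: ps => (c1 :: p) :: ps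
        | [] => [[c1]]
  | cs => [cs]

theorem split01Rec_ne_nil : ∀ cs : List Char, split01Rec cs ≠ []
  | [] => by simp [split01Rec]
  | [c] => by simp [split01Rec]
  | c1 :: c2 :: rest => by
      simp only [split01Rec]
      split
      · simp
      · cases h : split01Rec (c2 :: rest) <;> simp

theorem go_split_nil (sep : List Char) (fuel : Nat) (cur : List Char) (acc : List (List Char)) :
    PySem.Chars.splitOn.go sep fuel [] cur acc = (cur.reverse :: acc).reverse := by
  cases fuel <;> simp [PySem.Chars.splitOn.go]

theorem go01_one (f : Nat) (c : Char) (cur : List Char) (acc : List (List Char)) :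
    PySem.Chars.splitOn.go ['0', '1'] (f + 1) [c] cur acc
      = (((c :: cur).reverse) :: acc).reverse := by
  rw [show PySem.Chars.splitOn.go ['0', '1'] (f + 1) [c] cur acc
        = PySem.Chars.splitOn.go ['0', '1'] f [] (c :: cur) acc by
      simp [PySem.Chars.splitOn.go, List.isPrefixOf]]
  exact go_split_nil ['0', '1'] f (c :: cur) acc

theorem go01_sep (f : Nat) (rest cur : List Char) (acc : List (List Char)) :
    PySem.Chars.splitOn.go ['0', '1'] (f + 1) ('0' :: '1' :: rest) cur acc
      = PySem.Chars.splitOn.go ['0', '1'] f rest [] (cur.reverse :: acc) := by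
  simp [PySem.Chars.splitOn.go, List.isPrefixOf]

theorem go01_ne (f : Nat) (c1 c2 : Char) (rest cur : List Char) (acc : List (List Char))
    (h : ¬ (c1 = '0' ∧ c2 = '1')) :
    PySem.Chars.splitOn.go ['0', '1'] (f + 1) (c1 :: c2 :: rest) cur acc
      = PySem.Chars.splitOn.go ['0', '1'] f (c2 :: rest) (c1 :: cur) acc := by
  simp only [PySem.Chars.splitOn.go, List.isPrefixOf, Bool.and_true]
  split
  · rename_i hh
    simp only [Bool.and_eq_true, beq_iff_eq] at hh
    exact absurd ⟨hh.1.symm, hh.2.symm⟩ h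
  · rfl

theorem go_split01 : ∀ (cs : List Char) (fuel : Nat) (cur : List Char) (acc : List (List Char)),
    cs.length < fuel →
    PySem.Chars.splitOn.go ['0', '1'] fuel cs cur acc
      = acc.reverse ++ (match split01Rec cs with
          | p :: ps => (cur.reverse ++ p) :: ps
          | [] => [])
  | [], fuel, cur, acc, _ => by
      rw [go_split_nil]
      simp [split01Rec]
  | [c], fuel, cur, acc, h => by
      cases fuel with
      | zero => simp at h
      | succ f =>
          rw [go01_one]
          simp [split01Rec]
  | c1 :: c2 :: rest, fuel, cur, acc, h => by
      cases fuel with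
      | zero => simp at h
      | succ f =>
        by_cases hsep : c1 = '0' ∧ c2 = '1'
        · obtain ⟨h1, h2⟩ := hsep
          subst h1; subst h2
          rw [go01_sep, go_split01 rest f [] (cur.reverse :: acc) (by simp at h; omega)]
          obtain ⟨p, ps, hp⟩ : ∃ p ps, split01Rec rest = p :: ps := by
            cases hsp : split01Rec rest with
            | nil => exact absurd hsp (split01Rec_ne_nil rest)
            | cons a b => exact ⟨a, b, rfl⟩
          rw [show split01Rec ('0' :: '1' :: rest) = [] :: split01Rec rest by
            simp [split01Rec]]
          rw [hp]
          simp
        · rw [go01_ne f c1 c2 rest cur acc hsep,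
              go_split01 (c2 :: rest) f (c1 :: cur) acc (by simp at h ⊢; omega)]
          obtain ⟨p, ps, hp⟩ : ∃ p ps, split01Rec (c2 :: rest) = p :: ps := by
            cases hsp : split01Rec (c2 :: rest) with
            | nil => exact absurd hsp (split01Rec_ne_nil _)
            | cons a b => exact ⟨a, b, rfl⟩
          have hbB : (c1 == '0' && c2 == '1') = false := by
            by_cases h1 : c1 = '0'
            · have h2 : ¬ c2 = '1' := fun hh => hsep ⟨h1, hh⟩
              simp [beq_iff_eq, h2]
            · simp [beq_iff_eq, h1]
          rw [show split01Rec (c1 :: c2 :: rest) = (c1 :: p) :: ps by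
            simp [split01Rec, hbB, hp]]
          rw [hp]
          simp

theorem splitOn01_eq (cs : List Char) :
    PySem.Chars.splitOn cs ['0', '1'] = split01Rec cs := by
  rw [show PySem.Chars.splitOn cs ['0', '1']
        = PySem.Chars.splitOn.go ['0', '1'] (cs.length + 1) cs [] [] from rfl]
  rw [go_split01 cs (cs.length + 1) [] [] (by omega)]
  obtain ⟨p, ps, hp⟩ : ∃ p ps, split01Rec cs = p :: ps := by
    cases hsp : split01Rec cs with
    | nil => exact absurd hsp (split01Rec_ne_nil cs)
    | cons a b => exact ⟨a, b, rfl⟩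
  simp [hp]

theorem go_count1 (c0 : Char) : ∀ (cs : List Char) (fuel acc : Nat), cs.length ≤ fuel →
    PySem.Chars.count.go [c0] fuel cs acc = acc + cs.count c0 := by
  intro cs
  induction cs with
  | nil => intro fuel acc _; cases fuel <;> simp [PySem.Chars.count.go]
  | cons c rest ih =>
      intro fuel acc h
      cases fuel with
      | zero => simp at h
      | succ f =>
        have hf : rest.length ≤ f := by simp at h; omega
        by_cases hc : c = c0
        · subst hc
          rw [show PySem.Chars.count.go [c] (f + 1) (c :: rest) acc
                = PySem.Chars.count.go [c] f rest (acc + 1) by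
              simp [PySem.Chars.count.go, List.isPrefixOf]]
          rw [ih f (acc + 1) hf, List.count_cons]
          simp only [beq_self_eq_true, if_true]
          omega
        · rw [show PySem.Chars.count.go [c0] (f + 1) (c :: rest) acc
                = PySem.Chars.count.go [c0] f rest acc by
              simp only [PySem.Chars.count.go, List.isPrefixOf, Bool.and_true]
              split
              · rename_i hh; simp at hh; exact absurd hh.symm hc
              · rfl]
          rw [ih f acc hf, List.count_cons]
          have hcc : (c == c0) = false := beq_eq_false_iff_ne.mpr hc
          simp only [hcc, Bool.false_eq_true, if_false]
          omega

theorem count_single (c0 : Char) (cs : List Char) :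
    PySem.Chars.count cs [c0] = cs.count c0 := by
  rw [show PySem.Chars.count cs [c0] = PySem.Chars.count.go [c0] cs.length cs 0 from rfl]
  rw [go_count1 c0 cs cs.length 0 le_rfl]
  omega

-- The gap list A's loop accumulates, as a structural recursion over adjacent pairs.
def gapsOf : List Char → Int → List Int
  | c1 :: c2 :: rest, k =>
      let k' := if c1 == '0' then k + 1 else k
      if c2 == '1' && c1 == '0' then k' :: gapsOf (c2 :: rest) 0
      else gapsOf (c2 :: rest) k'
  | _, _ => []

theorem gapsOf_cons₂ (c1 c2 : Char) (rest : List Char) (k : Int) :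
    gapsOf (c1 :: c2 :: rest) k
      = if c2 == '1' && c1 == '0' then
          (if c1 == '0' then k + 1 else k) :: gapsOf (c2 :: rest) 0
        else gapsOf (c2 :: rest) (if c1 == '0' then k + 1 else k) := rfl

theorem gapsOf_one_cons : ∀ (rest : List Char) (k : Int), gapsOf ('1' :: rest) k = gapsOf rest k
  | [], k => rfl
  | c2 :: r, k => by
      rw [gapsOf_cons₂, if_neg (by simp), if_neg (by decide)]

-- An index loop reading positions i and i+1 is a fold over adjacent pairs.
theorem range_pairs : ∀ (cs : List Char) (init : List Int × Int),
    (List.range (cs.length - 1)).foldl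
        (fun (s : List Int × Int) i =>
          let c := cs.getD i ' '
          let c' := cs.getD (i + 1) ' '
          let count := if c == '0' then s.2 + 1 else s.2
          if c' == '1' && c == '0' then (s.1 ++ [count], (0 : Int)) else (s.1, count)) init
      = (cs.zip cs.tail).foldl
          (fun (s : List Int × Int) p =>
            let count := if p.1 == '0' then s.2 + 1 else s.2
            if p.2 == '1' && p.1 == '0' then (s.1 ++ [count], (0 : Int)) else (s.1, count)) init
  | [], init => by simp
  | [c], init => by simp
  | c1 :: c2 :: rest, init => by
      have ih := range_pairs (c2 :: rest)
        (let count := if c1 == '0' then init.2 + 1 else init.2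
         if c2 == '1' && c1 == '0' then (init.1 ++ [count], (0 : Int)) else (init.1, count))
      simp only [List.length_cons] at ih ⊢
      rw [show rest.length + 1 + 1 - 1 = (rest.length + 1 - 1) + 1 by omega,
          List.range_succ_eq_map, List.foldl_cons, List.foldl_map]
      simp only [List.getD_cons_succ, List.getD_cons_zero, List.tail_cons, List.zip_cons_cons,
        List.foldl_cons] at ih ⊢
      exact ih

theorem zip_fold_fst : ∀ (cs : List Char) (gaps : List Int) (k : Int),
    ((cs.zip cs.tail).foldl
        (fun (s : List Int × Int) p =>
          let count := if p.1 == '0' then s.2 + 1 else s.2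
          if p.2 == '1' && p.1 == '0' then (s.1 ++ [count], (0 : Int)) else (s.1, count))
        (gaps, k)).1
      = gaps ++ gapsOf cs k
  | [], gaps, k => by simp [gapsOf]
  | [c], gaps, k => by simp [gapsOf]
  | c1 :: c2 :: rest, gaps, k => by
      rw [show (c1 :: c2 :: rest).zip (c1 :: c2 :: rest).tail
            = (c1, c2) :: ((c2 :: rest).zip (c2 :: rest).tail) from rfl, List.foldl_cons]
      show (((c2 :: rest).zip (c2 :: rest).tail).foldl
          (fun (s : List Int × Int) p =>
            let count := if p.1 == '0' then s.2 + 1 else s.2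
            if p.2 == '1' && p.1 == '0' then (s.1 ++ [count], (0 : Int)) else (s.1, count))
          (if c2 == '1' && c1 == '0' then
              (gaps ++ [if c1 == '0' then k + 1 else k], (0 : Int))
            else (gaps, if c1 == '0' then k + 1 else k))).1
        = gaps ++ gapsOf (c1 :: c2 :: rest) k
      by_cases hf : (c2 == '1' && c1 == '0') = true
      · rw [if_pos hf, zip_fold_fst (c2 :: rest) (gaps ++ [if c1 == '0' then k + 1 else k]) 0,
            gapsOf_cons₂, if_pos hf]
        simp
      · rw [if_neg hf, zip_fold_fst (c2 :: rest) gaps (if c1 == '0' then k + 1 else k),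
            gapsOf_cons₂, if_neg hf]

-- Flushed gap values read off the "01"-split: (zeros in the piece) + 1, the seed added to the first.
def fgaps : Int → List (List Char) → List Int
  | _, [] => []
  | _, [_] => []
  | k, p :: ps@(_ :: _) => (k + (p.count '0' : Int) + 1) :: fgaps 0 ps

theorem fgaps_cons₂ (k : Int) (p q : List Char) (ps : List (List Char)) :
    fgaps k (p :: q :: ps) = (k + (p.count '0' : Int) + 1) :: fgaps 0 (q :: ps) := by
  simp only [fgaps]

theorem gaps01 : ∀ (cs : List Char) (k : Int), gapsOf cs k = fgaps k (split01Rec cs)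
  | [], k => by simp [gapsOf, split01Rec, fgaps]
  | [c], k => by simp [gapsOf, split01Rec, fgaps]
  | c1 :: c2 :: rest, k => by
      by_cases hsep : c1 = '0' ∧ c2 = '1'
      · obtain ⟨h1, h2⟩ := hsep
        subst h1; subst h2
        rw [gapsOf_cons₂, if_pos (by decide), if_pos (by decide), gapsOf_one_cons,
            gaps01 rest 0]
        rw [show split01Rec ('0' :: '1' :: rest) = [] :: split01Rec rest by
          simp [split01Rec]]
        obtain ⟨p, ps, hp⟩ : ∃ p ps, split01Rec rest = p :: ps := by
          cases hsp : split01Rec rest with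
          | nil => exact absurd hsp (split01Rec_ne_nil rest)
          | cons a b => exact ⟨a, b, rfl⟩
        rw [hp, fgaps_cons₂]
        congr 1
        simp
      · have hbB : (c1 == '0' && c2 == '1') = false := by
          by_cases h1 : c1 = '0'
          · have h2 : ¬ c2 = '1' := fun hh => hsep ⟨h1, hh⟩
            simp [beq_iff_eq, h2]
          · simp [beq_iff_eq, h1]
        have hb' : ((c2 == '1') && (c1 == '0')) = false := by
          rw [Bool.and_comm]; exact hbB
        rw [gapsOf_cons₂, if_neg (by simp [hb']),
            gaps01 (c2 :: rest) (if c1 == '0' then k + 1 else k)]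
        obtain ⟨p, ps, hp⟩ : ∃ p ps, split01Rec (c2 :: rest) = p :: ps := by
          cases hsp : split01Rec (c2 :: rest) with
          | nil => exact absurd hsp (split01Rec_ne_nil _)
          | cons a b => exact ⟨a, b, rfl⟩
        rw [show split01Rec (c1 :: c2 :: rest) = (c1 :: p) :: ps by
          simp [split01Rec, hbB, hp]]
        rw [hp]
        cases ps with
        | nil => simp only [fgaps]
        | cons q qs =>
            rw [fgaps_cons₂, fgaps_cons₂]
            congr 1
            by_cases hc1 : c1 = '0'
            · subst hc1
              rw [if_pos (by decide), List.count_cons]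
              simp only [beq_self_eq_true, if_true]
              push_cast
              ring
            · have hcc : (c1 == '0') = false := beq_eq_false_iff_ne.mpr hc1
              rw [if_neg (by simp [hcc]), List.count_cons]
              simp only [hcc, Bool.false_eq_true, if_false]
              norm_num

theorem fgaps_zero : ∀ ps : List (List Char),
    fgaps 0 ps = ps.dropLast.map (fun p => (p.count '0' : Int) + 1)
  | [] => by simp [fgaps]
  | [p] => by simp [fgaps]
  | p :: q :: ps => by
      rw [fgaps_cons₂, fgaps_zero (q :: ps),
          show (p :: q :: ps).dropLast = p :: (q :: ps).dropLast from rfl, List.map_cons]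
      congr 1
      ring

theorem split01_no_zero : ∀ cs : List Char, '0' ∉ cs → split01Rec cs = [cs]
  | [], _ => by simp [split01Rec]
  | [c], _ => by simp [split01Rec]
  | c1 :: c2 :: rest, h => by
      have h1 : ¬ c1 = '0' := fun e => h (e ▸ List.mem_cons_self)
      have hbB : (c1 == '0' && c2 == '1') = false := by simp [beq_iff_eq, h1]
      have ih := split01_no_zero (c2 :: rest) (fun m => h (List.mem_cons_of_mem _ m))
      simp [split01Rec, hbB, ih]

theorem slice_neg_one {α : Type} (l : List α) :
    PySem.List.slice l none (some (-1)) = l.dropLast := by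
  simp [PySem.List.slice]
  rw [List.dropLast_eq_take]

-- A's loop, bridged from pyRange/pyGet? to the structural gap list.
theorem loopA (binary : String) (h1 : 1 ≤ binary.toList.length) :
    ((PySem.List.pyRange 0 (PySem.Str.len binary - 1) 1).foldl
      (fun (s : List Int × Int) i =>
        let c  := (PySem.Str.pyGet? binary i).getD ' '
        let c' := (PySem.Str.pyGet? binary (i + 1)).getD ' '
        let count := if c == '0' then s.2 + 1 else s.2
        if c' == '1' && c == '0' then (s.1 ++ [count], (0 : Int)) else (s.1, count))
      ([], 0)).1 = gapsOf binary.toList 0 := by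
  have hl : PySem.Str.len binary - 1 = ((binary.toList.length - 1 : Nat) : Int) := by
    rw [show PySem.Str.len binary = ((binary.toList.length : Nat) : Int) from rfl]
    omega
  rw [hl, PySem.List.pyRange_zero_natCast, List.foldl_map]
  simp only [← Nat.cast_add_one, PySem.Str.pyGet?_natCast, ← List.getD_eq_getElem?_getD]
  rw [range_pairs binary.toList ([], 0)]
  exact zip_fold_fst binary.toList [] 0

-- ===== VERDICT (by name: the statement is the Claim_ definition above) =====
theorem solution_spec : Claim_equal_solution := by
  intro binary _
  unfold Spec_solution
  have hcount : PySem.Str.count binary "1" = binary.toList.count '1' := by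
    rw [PySem.Str.count_eq, show ("1" : String).toList = ['1'] from rfl]
    exact count_single '1' _
  by_cases hlt : PySem.Str.count binary "1" < 2
  · -- fewer than two '1's: both return 0
    have hB : solution_alt binary = 0 := by unfold solution_alt; rw [if_pos hlt]
    have hA : solution binary = 0 := by
      unfold solution
      by_cases h0 : PySem.Str.isIn "0" binary = false
      · rw [if_pos h0]
      · rw [if_neg h0, if_pos hlt]
    rw [hA, hB]
  · -- at least two '1's
    have hlen2 : 2 ≤ binary.toList.length := by
      have hc := List.count_le_length (a := '1') (l := binary.toList)
      rw [hcount] at hlt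
      omega
    have h := PySem.Str.split?_map binary "01"
    rw [show ("01" : String).toList = ['0', '1'] from rfl] at h
    rw [show PySem.Chars.split? binary.toList ['0', '1']
          = some (PySem.Chars.splitOn binary.toList ['0', '1']) from rfl, splitOn01_eq] at h
    obtain ⟨rs, hrs, hmap⟩ := Option.map_eq_some_iff.mp h
    have hlenrs : rs.length = (split01Rec binary.toList).length := by
      rw [← hmap, List.length_map]
    have hgaps : gapsOf binary.toList 0
        = (split01Rec binary.toList).dropLast.map (fun p => (p.count '0' : Int) + 1) := by
      rw [gaps01, fgaps_zero]
    have hmaplist :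
        ((PySem.List.slice ((PySem.Str.split? binary "01").getD []) none (some (-1))).map
          (fun p => (PySem.Str.count p "0" : Int) + 1)) = gapsOf binary.toList 0 := by
      rw [hrs, Option.getD_some, slice_neg_one, hgaps]
      rw [show (fun p : String => (PySem.Str.count p "0" : Int) + 1)
            = (fun p : String => ((p.toList.count '0' : Int) + 1)) from funext fun p => by
          rw [PySem.Str.count_eq, show ("0" : String).toList = ['0'] from rfl, count_single]]
      rw [show split01Rec binary.toList = rs.map String.toList from hmap.symm,
          List.map_dropLast, List.map_dropLast, List.map_map]
      rfl
    by_cases hp : rs.length = 1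
    · -- a single piece: no "01" in the string, so A's gap list is empty and both return 0
      have hB : solution_alt binary = 0 := by
        unfold solution_alt
        rw [if_neg hlt]
        show (if ((PySem.Str.split? binary "01").getD []).length = 1 then (0 : Int)
              else match PySem.List.max?
                  ((PySem.List.slice ((PySem.Str.split? binary "01").getD []) none
                      (some (-1))).map
                    (fun p => (PySem.Str.count p "0" : Int) + 1)) (fun y => y) with
                | some m => m
                | none => 0) = 0
        rw [hrs, Option.getD_some, if_pos hp]
      have hglen : (split01Rec binary.toList).length = 1 := by rw [← hlenrs]; exact hp
      have hge : gapsOf binary.toList 0 = [] := by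
        have hlen0 : (gapsOf binary.toList 0).length = 0 := by
          rw [hgaps, List.length_map, List.length_dropLast, hglen]
        exact List.length_eq_zero_iff.mp hlen0
      have hA : solution binary = 0 := by
        unfold solution
        by_cases h0 : PySem.Str.isIn "0" binary = false
        · rw [if_pos h0]
        · rw [if_neg h0, if_neg hlt]
          simp only [loopA binary (by omega)]
          rw [hge, if_pos (by simp)]
      rw [hA, hB]
    · -- at least one "01": the string contains a '0', and both sides take the same maximum
      have h0ne : ¬ PySem.Str.isIn "0" binary = false := by
        intro h0
        have hno : '0' ∉ binary.toList := by
          rw [PySem.Str.isIn_eq, show ("0" : String).toList = ['0'] from rfl] at h0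
          have hinf := (PySem.Chars.isIn_eq_false_iff _ _).mp h0
          intro hm
          obtain ⟨s, tl, hst⟩ := List.append_of_mem hm
          exact hinf ⟨s, tl, by rw [hst]; simp⟩
        have hone := split01_no_zero binary.toList hno
        rw [hone] at hlenrs
        exact hp (by simpa using hlenrs)
      obtain ⟨g, gt, hg⟩ : ∃ g gt, gapsOf binary.toList 0 = g :: gt := by
        have hrs1 : 1 ≤ rs.length := by
          rw [hlenrs]
          exact List.length_pos_of_ne_nil (split01Rec_ne_nil _)
        have hpos : 1 ≤ (gapsOf binary.toList 0).length := by
          rw [hgaps, List.length_map, List.length_dropLast, ← hlenrs]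
          omega
        cases hcase : gapsOf binary.toList 0 with
        | nil => rw [hcase] at hpos; simp at hpos
        | cons a b => exact ⟨a, b, rfl⟩
      have hA : solution binary
          = (match PySem.List.max? (g :: gt) (fun y => y) with
             | some m => m
             | none => 0) := by
        unfold solution
        rw [if_neg h0ne, if_neg hlt]
        simp only [loopA binary (by omega)]
        rw [hg, if_neg (by simp)]
      have hB : solution_alt binary
          = (match PySem.List.max? (g :: gt) (fun y => y) with
             | some m => m
             | none => 0) := by
        unfold solution_alt
        rw [if_neg hlt]
        show (if ((PySem.Str.split? binary "01").getD []).length = 1 then (0 : Int)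
              else match PySem.List.max?
                  ((PySem.List.slice ((PySem.Str.split? binary "01").getD []) none
                      (some (-1))).map
                    (fun p => (PySem.Str.count p "0" : Int) + 1)) (fun y => y) with
                | some m => m
                | none => 0) = _
        rw [hmaplist, hg, hrs, Option.getD_some, if_neg hp]
      rw [hA, hB]
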